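-- pv_equiv track=rewrite | github.com/Psimcoe3/simcoe.ai | scripts/build_estimate_index.py | _normalise_description
-- ===== SOURCE A (Python) =====
-- def _clean_value(value):
--     if value is None:
--         return None
--     if isinstance(value, str):
--         cleaned = " ".join(value.strip().split())
--         return cleaned or None
--     if isinstance(value, bool):
--         return "true" if value else "false"
--     if isinstance(value, (int, float)):
--         return str(value)
--     return str(value)
--
-- def _normalise_description(value: str | None) -> str | None:
--     cleaned = _clean_value(value)
--     if not cleaned:
--         return None
--
--     normalized = []
--     for char in cleaned.lower():
--         normalized.append(char if char.isalnum() else " ")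
--     return " ".join("".join(normalized).split()) or None
-- ===== SOURCE B (Python) =====
-- def _normalise_description(value):
--     if value is None:
--         return None
--     cleaned = " ".join(value.strip().split())
--     if not cleaned:
--         return None
--     words = []
--     buf = []
--     for ch in cleaned.lower():
--         if ch.isalnum():
--             buf.append(ch)
--         else:
--             if buf:
--                 words.append("".join(buf))
--                 buf = []
--     if buf:
--         words.append("".join(buf))
--     return " ".join(words) or None
-- ===== Notes on version B (the rewrite author's own statement) =====
-- stated objective: alternative
-- what changed: The per-character replace-to-space list build followed by join/split/join is replaced by a single char-by-char tokenizer pass that accumulates alphanumeric runs into a word buffer and flushes them into the words list, joining once at the end.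
import Mathlib
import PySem

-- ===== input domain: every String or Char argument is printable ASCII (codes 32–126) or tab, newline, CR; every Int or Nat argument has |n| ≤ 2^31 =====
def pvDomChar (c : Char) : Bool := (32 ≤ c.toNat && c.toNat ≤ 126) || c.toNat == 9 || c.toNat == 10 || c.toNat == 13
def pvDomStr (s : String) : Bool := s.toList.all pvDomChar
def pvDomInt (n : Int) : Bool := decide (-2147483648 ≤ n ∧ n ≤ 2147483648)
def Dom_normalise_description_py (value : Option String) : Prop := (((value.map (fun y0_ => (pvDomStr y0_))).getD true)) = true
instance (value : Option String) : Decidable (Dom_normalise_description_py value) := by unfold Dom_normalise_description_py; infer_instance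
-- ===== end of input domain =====

-- B keeps A's whitespace-clean guard but replaces the per-char blank-out + join + split + join
-- normalisation by a single char-by-char tokenizer pass (alternative decomposition, similar cost).


-- ===== PORT A =====
-- _clean_value restricted to its str branch (the only one reachable from an Option String argument)
def clean_value_str (v : String) : Option String :=
  let cleaned := PySem.Str.join " " (PySem.Str.split₀ (PySem.Str.strip v))
  if cleaned = "" then none else some cleaned

def normalise_description_py (value : Option String) : Option String :=
  match value with
  | none => none
  | some v =>
    match clean_value_str v with
    | none => none
    | some cleaned =>
      -- normalized = []; for char in cleaned.lower(): normalized.append(char if char.isalnum() else " ")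
      let normalized : List Char := (PySem.Str.lower cleaned).toList.foldl
        (fun acc c => acc ++ [if PySem.Chars.isalnum c then c else ' ']) []
      -- " ".join("".join(normalized).split()) or None
      let res := PySem.Str.join " " (PySem.Str.split₀ (String.ofList normalized))
      if res = "" then none else some res

-- ===== PORT B =====
-- flush the current-word buffer into the words list (Source B's `if buf: words.append("".join(buf))`)
def nd_flush (buf : List Char) (words : List (List Char)) : List (List Char) :=
  if buf.isEmpty then words else words ++ [buf]

-- Source B's single-pass tokenizer loop over the lowered characters
def nd_go : List Char → List Char → List (List Char) → List (List Char)
  | [], buf, words => nd_flush buf words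
  | c :: rest, buf, words =>
    if PySem.Chars.isalnum c then nd_go rest (buf ++ [c]) words
    else nd_go rest [] (nd_flush buf words)

def normalise_description_py_alt (value : Option String) : Option String :=
  match value with
  | none => none
  | some v =>
    let cleaned := PySem.Str.join " " (PySem.Str.split₀ (PySem.Str.strip v))
    if cleaned = "" then none
    else
      let words := nd_go (PySem.Str.lower cleaned).toList [] []
      let res := PySem.Chars.join [' '] words
      if res = [] then none else some (String.ofList res)

-- ===== PRECONDITION & SPEC =====
def Spec_normalise_description_py (value : Option String) (out : Option String) : Prop := out = normalise_description_py_alt value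
instance (value : Option String) (out : Option String) : Decidable (Spec_normalise_description_py value out) := by unfold Spec_normalise_description_py; infer_instance

-- ===== CLAIM (what is proved, stated in full; the proofs are below) =====
def Claim_equal_normalise_description_py : Prop := ∀ (value : Option String), Dom_normalise_description_py value → Spec_normalise_description_py value (normalise_description_py value)

-- ===== LEMMAS AND PROOFS =====

-- an alphanumeric character is never whitespace (the ASCII alnum ranges avoid every isspace code)
theorem isspace_eq_false_of_isalnum (c : Char) (h : PySem.Chars.isalnum c = true) :
    PySem.Chars.isspace c = false := by
  simp only [PySem.Chars.isalnum, PySem.Chars.isalpha, PySem.Chars.isdigit, PySem.Chars.isupper,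
    PySem.Chars.islower, Bool.or_eq_true, Bool.and_eq_true, decide_eq_true_eq, Char.le_def] at h
  simp only [PySem.Chars.isspace, Bool.or_eq_false_iff, Bool.and_eq_false_iff,
    decide_eq_false_iff_not]
  have hv : c.toNat = c.val.toNat := rfl
  rcases h with (⟨h1, h2⟩ | ⟨h1, h2⟩) | ⟨h1, h2⟩ <;>
    · have g1 := UInt32.le_iff_toNat_le.mp h1
      have g2 := UInt32.le_iff_toNat_le.mp h2
      simp only [show ('A' : Char).val.toNat = 65 from rfl, show ('Z' : Char).val.toNat = 90 from rfl,
        show ('a' : Char).val.toNat = 97 from rfl, show ('z' : Char).val.toNat = 122 from rfl,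
        show ('0' : Char).val.toNat = 48 from rfl, show ('9' : Char).val.toNat = 57 from rfl] at g1 g2
      omega

-- the two equations of the library's split₀ loop, stated as rewrite rules
theorem split₀_go_cons (c : Char) (rest cur : List Char) (acc : List (List Char)) :
    PySem.Chars.split₀.go (c :: rest) cur acc =
      if PySem.Chars.isspace c then
        (if cur.isEmpty then PySem.Chars.split₀.go rest [] acc
         else PySem.Chars.split₀.go rest [] (cur.reverse :: acc))
      else PySem.Chars.split₀.go rest (c :: cur) acc := by
  rw [PySem.Chars.split₀.go]

theorem split₀_go_nil (cur : List Char) (acc : List (List Char)) :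
    PySem.Chars.split₀.go [] cur acc =
      if cur.isEmpty then acc.reverse else (cur.reverse :: acc).reverse := by
  rw [PySem.Chars.split₀.go]

-- B's tokenizer over cs is A's split₀ over the blanked-out copy of cs
theorem nd_go_eq_split₀_go (cs : List Char) : ∀ (buf : List Char) (words : List (List Char)),
    nd_go cs buf words =
      PySem.Chars.split₀.go (cs.map (fun c => if PySem.Chars.isalnum c then c else ' '))
        buf.reverse words.reverse := by
  induction cs with
  | nil =>
    intro buf words
    rw [List.map_nil, split₀_go_nil]
    by_cases hb : buf = [] <;> simp [nd_go, nd_flush, hb]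
  | cons c rest ih =>
    intro buf words
    rw [List.map_cons]
    by_cases hc : PySem.Chars.isalnum c = true
    · rw [if_pos hc, split₀_go_cons, if_neg (by simp [isspace_eq_false_of_isalnum c hc])]
      rw [show nd_go (c :: rest) buf words = nd_go rest (buf ++ [c]) words by simp [nd_go, hc],
        ih (buf ++ [c]) words]
      simp
    · rw [if_neg hc, split₀_go_cons, if_pos (by decide)]
      rw [show nd_go (c :: rest) buf words = nd_go rest [] (nd_flush buf words) by
        simp [nd_go, hc]]
      by_cases hb : buf = []
      · simp [hb, nd_flush, ih [] words]
      · rw [if_neg (by simp [hb]), ih [] (nd_flush buf words)]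
        simp [nd_flush, hb]

theorem normalise_description_py_eq_alt (value : Option String) :
    normalise_description_py value = normalise_description_py_alt value := by
  cases value with
  | none => rfl
  | some v =>
    simp only [normalise_description_py, normalise_description_py_alt, clean_value_str]
    set cleaned := PySem.Str.join " " (PySem.Str.split₀ (PySem.Str.strip v)) with hcl
    by_cases h : cleaned = ""
    · simp only [if_pos h]
    · simp only [if_neg h]
      set L := (PySem.Str.lower cleaned).toList with hL
      have hnorm : L.foldl (fun acc c => acc ++ [if PySem.Chars.isalnum c then c else ' ']) [] =
          L.map (fun c => if PySem.Chars.isalnum c then c else ' ') := by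
        simpa using PySem.List.foldl_append_singleton_eq_map
          (fun c => if PySem.Chars.isalnum c then c else ' ') L []
      have hwords : nd_go L [] [] =
          PySem.Chars.split₀ (L.map (fun c => if PySem.Chars.isalnum c then c else ' ')) := by
        rw [nd_go_eq_split₀_go]; rfl
      have hres : (PySem.Str.join " " (PySem.Str.split₀ (String.ofList (L.foldl
              (fun acc c => acc ++ [if PySem.Chars.isalnum c then c else ' ']) [])))).toList =
          PySem.Chars.join [' '] (nd_go L [] []) := by
        rw [hnorm, hwords, PySem.Str.toList_join, PySem.Str.split₀_map_toList,
          String.toList_ofList, String.toList_ofList]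
      set resA := PySem.Str.join " " (PySem.Str.split₀ (String.ofList (L.foldl
          (fun acc c => acc ++ [if PySem.Chars.isalnum c then c else ' ']) []))) with hra
      set resB := PySem.Chars.join [' '] (nd_go L [] []) with hrb
      have hAB : resA = String.ofList resB := String.toList_inj.mp (by
        rw [hres, String.toList_ofList])
      show (if resA = "" then none else some resA) = (if resB = [] then none else some (String.ofList resB))
      by_cases hz : resB = []
      · rw [if_pos hz, if_pos (by rw [hAB, hz])]
      · rw [if_neg hz, if_neg (by
          rw [hAB]; intro hcon
          exact hz (by simpa using congrArg String.toList hcon)), hAB]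

-- ===== VERDICT (by name: the statement is the Claim_ definition above) =====
theorem normalise_description_py_spec : Claim_equal_normalise_description_py :=
  fun value _ => normalise_description_py_eq_alt value
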